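-- pv_equiv track=rewrite | github.com/fmm4/Projeto-AM | projetoAM_python/mlp/mlpsvm.py | calculate_dmatrix
-- ===== SOURCE A (Python) =====
-- def delta(i,j):
--     if i != j:
--         return 1
--     else:
--         return 0
--
-- def dissimilarity(x1,x2):
--     valor = sum([delta(x1[i],x2[i]) for i in range(len(x1)-1)])
--     return valor
--
-- def calculate_dmatrix(matrix):
--     matrix_heigth = len(matrix)
--     matrix_width = len(matrix[0][:-1])
--     posi_lines = []
--     nega_lines = []
--     dmatrix = []
--     for i in range(matrix_heigth):
--         new_line = []
--         for j in range(matrix_heigth):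
--             new_line.append(dissimilarity(matrix[i],matrix[j]))
--         dmatrix.append(new_line)
--     return dmatrix
-- ===== SOURCE B (Python) =====
-- def calculate_dmatrix(matrix):
--     n = len(matrix)
--     w = max(len(matrix[0]) - 1, 0)
--     dmatrix = [[w] * n for _ in range(n)]
--     for k in range(w):
--         buckets = {}
--         for i, row in enumerate(matrix):
--             buckets[row[k]] = buckets.get(row[k], []) + [i]
--         for group in buckets.values():
--             for i in group:
--                 for j in group:
--                     dmatrix[i][j] -= 1
--     return dmatrix
-- ===== Notes on version B (the rewrite author's own statement) =====
-- stated objective: faster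
-- what changed: B never compares two rows directly: for each column it builds a dict bucketing row indices by value (an inverted index) and decrements only same-bucket index pairs in a matrix pre-filled with the column count w, instead of A's per-pair dissimilarity scan over all columns for every ordered pair of rows.
-- outside the precondition, e.g. on calculate_dmatrix([[1, 2], [3]]): A returns [[0, 1], [0, 0]], B returns [[0, 1], [1, 0]]; on calculate_dmatrix([]): A raises IndexError, B raises IndexError
import Mathlib
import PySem

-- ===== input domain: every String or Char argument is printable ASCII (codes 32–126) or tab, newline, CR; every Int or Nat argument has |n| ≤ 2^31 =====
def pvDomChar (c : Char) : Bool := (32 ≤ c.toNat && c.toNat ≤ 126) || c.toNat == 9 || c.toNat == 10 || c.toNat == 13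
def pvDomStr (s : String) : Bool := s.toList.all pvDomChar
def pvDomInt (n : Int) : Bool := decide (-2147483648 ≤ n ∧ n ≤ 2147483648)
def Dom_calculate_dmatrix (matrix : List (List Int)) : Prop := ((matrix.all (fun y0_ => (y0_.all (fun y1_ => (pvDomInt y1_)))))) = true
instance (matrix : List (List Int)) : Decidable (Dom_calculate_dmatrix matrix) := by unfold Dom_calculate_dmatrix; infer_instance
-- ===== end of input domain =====

-- B replaces A's pairwise row-comparison double loop by a per-column inverted index: each column is
-- bucketed by value in a dict, and only same-bucket index pairs are decremented from a matrix
-- pre-filled with the column count (measured much faster on the generated inputs).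


-- ===== PORT A =====
def delta (i j : Int) : Int := if i ≠ j then 1 else 0

def dissimilarity (x1 x2 : List Int) : Int :=
  ((PySem.List.pyRange 0 ((x1.length : Int) - 1) 1).map
    (fun i => delta (PySem.List.pyGetD x1 i 0) (PySem.List.pyGetD x2 i 0))).sum

def calculate_dmatrix (matrix : List (List Int)) : List (List Int) :=
  let matrix_heigth : Int := matrix.length
  let _matrix_width : Int :=
    (PySem.List.slice (PySem.List.pyGetD matrix 0 []) none (some (-1))).length
  let dmatrix : List (List Int) := []
  (PySem.List.pyRange 0 matrix_heigth 1).foldl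
    (fun dm i =>
      let new_line :=
        (PySem.List.pyRange 0 matrix_heigth 1).foldl
          (fun nl j =>
            nl ++ [dissimilarity (PySem.List.pyGetD matrix i []) (PySem.List.pyGetD matrix j [])])
          []
      dm ++ [new_line])
    dmatrix

-- ===== PORT B =====
-- dmatrix[i][j] = v and dmatrix[i][j] reads, on a nested list
def setEntry (m : List (List Int)) (i j : Nat) (v : Int) : List (List Int) :=
  m.set i ((m.getD i []).set j v)

def entryOf (dm : List (List Int)) (a b : Nat) : Int := (dm.getD a []).getD b 0

-- buckets = {}; for i, row in enumerate(matrix): buckets[row[k]] = buckets.get(row[k], []) + [i]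
def bucketFold (matrix : List (List Int)) (k : Nat) : PySem.Dict Int (List Int) :=
  (PySem.List.enumerate matrix).foldl
    (fun d p => d.modify (p.2.getD k 0) [] (fun g => g ++ [p.1])) PySem.Dict.empty

-- for i in group: for j in group: dmatrix[i][j] -= 1
def decPairs (dm : List (List Int)) (g : List Int) : List (List Int) :=
  g.foldl (fun dm i =>
    g.foldl (fun dm j => setEntry dm i.toNat j.toNat (entryOf dm i.toNat j.toNat - 1)) dm) dm

-- one iteration of B's outer loop over the column index k
def colStep (matrix : List (List Int)) (dm : List (List Int)) (k : Nat) : List (List Int) :=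
  (bucketFold matrix k).values.foldl decPairs dm

def calculate_dmatrix_alt (matrix : List (List Int)) : List (List Int) :=
  let n := matrix.length
  let w : Nat := (matrix.headD []).length - 1   -- Python's max(len(matrix[0]) - 1, 0): Nat subtraction is that clamp
  (List.range w).foldl (colStep matrix) (List.replicate n (List.replicate n (w : Int)))

-- ===== PRECONDITION & SPEC =====
-- Pre_ excludes the empty matrix, on which A raises IndexError at matrix[0], and ragged matrices,
-- on which A's asymmetric per-row column count (len(x1)-1) is an accident of its implementation
-- and A frequently raises IndexError.
def Pre_calculate_dmatrix (matrix : List (List Int)) : Prop :=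
  matrix ≠ [] ∧ ∀ r ∈ matrix, r.length = (matrix.headD []).length

instance (matrix : List (List Int)) : Decidable (Pre_calculate_dmatrix matrix) := by
  unfold Pre_calculate_dmatrix; infer_instance

def pvWitness_calculate_dmatrix : List (List Int) := [[1, 2, 9], [1, 3, 9], [2, 3, 9]]

def Spec_calculate_dmatrix (matrix : List (List Int)) (out : List (List Int)) : Prop :=
  out = calculate_dmatrix_alt matrix
instance (matrix : List (List Int)) (out : List (List Int)) : Decidable (Spec_calculate_dmatrix matrix out) := by
  unfold Spec_calculate_dmatrix; infer_instance

-- ===== CLAIM (what is proved, stated in full; the proofs are below) =====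
def Claim_equal_calculate_dmatrix : Prop :=
  ∀ (matrix : List (List Int)), Dom_calculate_dmatrix matrix →
    Pre_calculate_dmatrix matrix →
    Spec_calculate_dmatrix matrix (calculate_dmatrix matrix)

-- ===== LEMMAS AND PROOFS =====

-- the value of row a in column k (0 defaults never reached on admitted indices)
def colv (matrix : List (List Int)) (k a : Nat) : Int := (matrix.getD a []).getD k 0

-- the mismatch count of rows a and b over the first (len row_a - 1) columns
def ent (matrix : List (List Int)) (a b : Nat) : Int :=
  (((List.range ((matrix.getD a []).length - 1)).countP
    (fun k => (matrix.getD a []).getD k 0 ≠ (matrix.getD b []).getD k 0) : Nat) : Int)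

lemma dissim_eq (x1 x2 : List Int) :
    dissimilarity x1 x2 =
      (((List.range (x1.length - 1)).countP
        (fun k => x1.getD k 0 ≠ x2.getD k 0) : Nat) : Int) := by
  unfold dissimilarity delta
  rw [PySem.List.pyRange_one]
  have h : (((x1.length : Int) - 1) - 0).toNat = x1.length - 1 := by omega
  rw [h, List.map_map]
  rw [← PySem.List.sum_map_ite_one_zero (fun k => decide (x1.getD k 0 ≠ x2.getD k 0))]
  congr 1
  apply List.map_congr_left
  intro k _
  simp [PySem.List.pyGetD_natCast]

-- A's result as a map of maps of per-pair mismatch counts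
lemma calcA_eq (matrix : List (List Int)) :
    calculate_dmatrix matrix =
      (List.range matrix.length).map (fun i =>
        (List.range matrix.length).map (fun j => ent matrix i j)) := by
  unfold calculate_dmatrix
  simp only [PySem.List.foldl_append_singleton_eq_map, List.nil_append,
    PySem.List.pyRange_zero_natCast, List.map_map]
  apply List.map_congr_left
  intro i _
  apply List.map_congr_left
  intro j _
  simp only [Function.comp, PySem.List.pyGetD_natCast, dissim_eq, ent]

lemma length_setEntry (m : List (List Int)) (i j : Nat) (v : Int) :
    (setEntry m i j v).length = m.length := by
  simp [setEntry]

lemma rowlen_setEntry (m : List (List Int)) (i j a : Nat) (v : Int) :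
    ((setEntry m i j v).getD a []).length = ((m.getD a []).length) := by
  by_cases hi : i < m.length
  · by_cases hai : a = i
    · subst hai
      simp [setEntry, List.getD_eq_getElem?_getD, hi]
    · simp [setEntry, List.getD_eq_getElem?_getD, Ne.symm hai]
  · simp [setEntry, List.set_eq_of_length_le (by omega : m.length ≤ i)]

lemma entry_setEntry (m : List (List Int)) (i j a b : Nat) (v : Int)
    (hi : i < m.length) (hj : j < (m.getD i []).length) :
    entryOf (setEntry m i j v) a b = if a = i ∧ b = j then v else entryOf m a b := by
  rcases eq_or_ne a i with rfl | hai
  · have hrow : (setEntry m a j v).getD a [] = (m.getD a []).set j v := by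
      rw [setEntry, List.getD_eq_getElem?_getD, List.getElem?_set_self hi, Option.getD_some]
    rcases eq_or_ne b j with rfl | hbj
    · have hb' : b < (m.getD a []).length := hj
      rw [entryOf, hrow, if_pos ⟨rfl, rfl⟩, List.getD_eq_getElem?_getD,
        List.getElem?_set_self hb', Option.getD_some]
    · rw [entryOf, hrow, if_neg (by tauto), List.getD_eq_getElem?_getD,
        List.getElem?_set_ne (Ne.symm hbj), entryOf, List.getD_eq_getElem?_getD]
      rw [List.getD_eq_getElem?_getD]
  · have hrow : (setEntry m i j v).getD a [] = m.getD a [] := by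
      rw [setEntry, List.getD_eq_getElem?_getD, List.getElem?_set_ne (Ne.symm hai),
        ← List.getD_eq_getElem?_getD]
    rw [entryOf, hrow, if_neg (by tauto)]
    rfl

-- dm has shape n × n
def ShapeN (n : Nat) (dm : List (List Int)) : Prop :=
  dm.length = n ∧ ∀ a, a < n → (dm.getD a []).length = n

lemma shape_setEntry (n : Nat) (dm : List (List Int)) (i j : Nat) (v : Int)
    (h : ShapeN n dm) : ShapeN n (setEntry dm i j v) := by
  refine ⟨by rw [length_setEntry, h.1], ?_⟩
  intro a ha; rw [rowlen_setEntry]; exact h.2 a ha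

-- inner loop of decPairs: row i.toNat loses one per occurrence of the target column in g
lemma inner_dec_aux (n : Nat) (i : Int) (hi : 0 ≤ i) (hin : i.toNat < n) :
    ∀ (g : List Int), (∀ x ∈ g, 0 ≤ x ∧ x.toNat < n) → ∀ dm, ShapeN n dm →
      ShapeN n (g.foldl (fun dm j => setEntry dm i.toNat j.toNat (entryOf dm i.toNat j.toNat - 1)) dm) ∧
      ∀ a b, a < n → b < n →
        entryOf (g.foldl (fun dm j => setEntry dm i.toNat j.toNat (entryOf dm i.toNat j.toNat - 1)) dm) a b
          = entryOf dm a b - (if (a : Int) = i then (g.count (b : Int) : Int) else 0) := by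
  intro g
  induction g with
  | nil => intro _ dm h; exact ⟨h, fun a b _ _ => by simp⟩
  | cons x g ih =>
    intro hg dm h
    have hx := hg x (by simp)
    have hsh : ShapeN n (setEntry dm i.toNat x.toNat (entryOf dm i.toNat x.toNat - 1)) :=
      shape_setEntry n dm _ _ _ h
    have hg' : ∀ y ∈ g, 0 ≤ y ∧ y.toNat < n := fun y hy => hg y (by simp [hy])
    obtain ⟨hsh2, hent⟩ :=
      ih hg' (setEntry dm i.toNat x.toNat (entryOf dm i.toNat x.toNat - 1)) hsh
    refine ⟨by simpa using hsh2, ?_⟩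
    intro a b ha hb
    simp only [List.foldl_cons]
    rw [hent a b ha hb,
      entry_setEntry dm i.toNat x.toNat a b _ (by rw [h.1]; exact hin) (by rw [h.2 i.toNat hin]; exact hx.2)]
    by_cases hai : (a : Int) = i
    · have hai' : a = i.toNat := by omega
      rcases eq_or_ne x ((b : Nat) : Int) with rfl | hxb
      · rw [if_pos ⟨hai', by omega⟩, if_pos hai, if_pos hai, List.count_cons_self]
        simp only [hai', Int.toNat_natCast]; push_cast; ring
      · have hbx : ¬ b = x.toNat := by
          intro hc
          exact hxb (by have := (hg x (by simp)).1; omega)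
        rw [if_neg (by tauto), if_pos hai, if_pos hai, List.count_cons_of_ne hxb]
    · have hai' : ¬ a = i.toNat := by omega
      rw [if_neg (by tauto), if_neg hai, if_neg hai]

-- outer loop of decPairs over an iteration list l, with the bucket g fixed
lemma mid_dec_aux (n : Nat) (g : List Int) (hgg : ∀ x ∈ g, 0 ≤ x ∧ x.toNat < n) :
    ∀ (l : List Int), (∀ x ∈ l, 0 ≤ x ∧ x.toNat < n) → ∀ dm, ShapeN n dm →
      ShapeN n (l.foldl (fun dm i =>
          g.foldl (fun dm j => setEntry dm i.toNat j.toNat (entryOf dm i.toNat j.toNat - 1)) dm) dm) ∧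
      ∀ a b, a < n → b < n →
        entryOf (l.foldl (fun dm i =>
            g.foldl (fun dm j => setEntry dm i.toNat j.toNat (entryOf dm i.toNat j.toNat - 1)) dm) dm) a b
          = entryOf dm a b - (l.count (a : Int) : Int) * (g.count (b : Int) : Int) := by
  intro l
  induction l with
  | nil => intro _ dm h; exact ⟨h, fun a b _ _ => by simp⟩
  | cons x l ih =>
    intro hl dm h
    have hx := hl x (by simp)
    obtain ⟨hsh1, hent1⟩ := inner_dec_aux n x hx.1 hx.2 g hgg dm h
    have hl' : ∀ y ∈ l, 0 ≤ y ∧ y.toNat < n := fun y hy => hl y (by simp [hy])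
    obtain ⟨hsh2, hent2⟩ := ih hl' _ hsh1
    refine ⟨by simpa using hsh2, ?_⟩
    intro a b ha hb
    simp only [List.foldl_cons]
    rw [hent2 a b ha hb, hent1 a b ha hb]
    rcases eq_or_ne x ((a : Nat) : Int) with rfl | hxa
    · rw [if_pos rfl, List.count_cons_self]
      push_cast; ring
    · rw [if_neg (fun hc => hxa hc.symm), List.count_cons_of_ne hxa]
      ring

-- decPairs subtracts (count of a in g) * (count of b in g) from entry (a,b)
lemma decPairs_entry (n : Nat) (g : List Int) (hg : ∀ x ∈ g, 0 ≤ x ∧ x.toNat < n) :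
    ∀ dm, ShapeN n dm →
      ShapeN n (decPairs dm g) ∧
      ∀ a b, a < n → b < n →
        entryOf (decPairs dm g) a b
          = entryOf dm a b - (g.count (a : Int) : Int) * (g.count (b : Int) : Int) := by
  intro dm h
  exact mid_dec_aux n g hg g hg dm h

-- the fold of decPairs over a list of groups subtracts the sum of the per-group products
lemma groups_dec_aux (n : Nat) :
    ∀ (vs : List (List Int)), (∀ g ∈ vs, ∀ x ∈ g, 0 ≤ x ∧ x.toNat < n) → ∀ dm, ShapeN n dm →
      ShapeN n (vs.foldl decPairs dm) ∧
      ∀ a b, a < n → b < n →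
        entryOf (vs.foldl decPairs dm) a b
          = entryOf dm a b -
            ((vs.map (fun g => (g.count (a : Int) : Int) * (g.count (b : Int) : Int))).sum) := by
  intro vs
  induction vs with
  | nil => intro _ dm h; exact ⟨h, fun a b _ _ => by simp⟩
  | cons g vs ih =>
    intro hvs dm h
    have hgm : ∀ x ∈ g, 0 ≤ x ∧ x.toNat < n := hvs g (by simp)
    obtain ⟨hsh1, hent1⟩ := decPairs_entry n g hgm dm h
    have hvs' : ∀ g' ∈ vs, ∀ x ∈ g', 0 ≤ x ∧ x.toNat < n := fun g' hg' => hvs g' (by simp [hg'])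
    obtain ⟨hsh2, hent2⟩ := ih hvs' (decPairs dm g) hsh1
    refine ⟨by simpa using hsh2, ?_⟩
    intro a b ha hb
    simp only [List.foldl_cons, List.map_cons, List.sum_cons]
    rw [hent2 a b ha hb, hent1 a b ha hb]
    ring

-- the (value, index) pairs B's bucket loop processes for column k
def pairsL (matrix : List (List Int)) (k : Nat) : List (Int × Int) :=
  (List.range matrix.length).map (fun t => (colv matrix k t, (t : Int)))

lemma bucketFold_eq (matrix : List (List Int)) (k : Nat) :
    bucketFold matrix k =
      (pairsL matrix k).foldl (fun d p => d.modify p.1 [] (fun g => g ++ [p.2]))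
        PySem.Dict.empty := by
  unfold bucketFold pairsL
  rw [PySem.List.enumerate_eq_map_pyRange matrix ([] : List Int)]
  simp only [PySem.List.len, PySem.List.pyRange_zero_natCast, List.map_map, List.foldl_map,
    Function.comp, PySem.List.pyGetD_natCast, colv]

-- every index in every bucket is an in-range row index
lemma nodup_bucket_keys (matrix : List (List Int)) (k : Nat) :
    (bucketFold matrix k).keys.Nodup := by
  rw [bucketFold_eq]
  exact PySem.Dict.nodup_keys_foldl_modify_key (pairsL matrix k) (fun p => p.1) []
    (fun _ p => fun g => g ++ [p.2]) PySem.Dict.empty (by simp)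

lemma bucket_getD (matrix : List (List Int)) (k : Nat) (v : Int) :
    (bucketFold matrix k).getD v []
      = ((pairsL matrix k).filter (fun p => p.1 == v)).map (fun p => p.2) := by
  rw [bucketFold_eq, PySem.Dict.getD_foldl_modify_append]
  simp

lemma bucket_elems (matrix : List (List Int)) (k : Nat) :
    ∀ g ∈ (bucketFold matrix k).values, ∀ x ∈ g, 0 ≤ x ∧ x.toNat < matrix.length := by
  intro g hg x hx
  rw [PySem.Dict.values_eq_map_keys _ (nodup_bucket_keys matrix k) []] at hg
  obtain ⟨v, _, rfl⟩ := List.mem_map.mp hg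
  rw [bucket_getD] at hx
  obtain ⟨p, hp, rfl⟩ := List.mem_map.mp hx
  obtain ⟨t, ht, rfl⟩ := List.mem_map.mp (List.mem_of_mem_filter hp)
  simp only [List.mem_range] at ht
  exact ⟨by positivity, by simpa using ht⟩

lemma countP_range_aux (q : Nat → Bool) (a n : Nat) :
    (List.range n).countP (fun t => (t == a) && q t) = if a < n ∧ q a then 1 else 0 := by
  induction n with
  | zero => simp
  | succ n ih =>
    rw [List.range_succ, List.countP_append, ih]
    simp only [List.countP_cons, List.countP_nil]
    rcases Nat.lt_trichotomy a n with h|rfl|h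
    · simp [Nat.ne_of_lt' h, h, Nat.lt_succ_of_lt h]
    · by_cases hq : q a <;> simp [hq]
    · have h1 : ¬ a < n := by omega
      have h2 : ¬ a < n + 1 := by omega
      simp [Nat.ne_of_lt h, h1, h2]

-- how often a given row index a appears in the bucket of value v
lemma count_bucket (matrix : List (List Int)) (k : Nat) (v : Int) (a : Nat) :
    ((((pairsL matrix k).filter (fun p => p.1 == v)).map (fun p => p.2)).count (a : Int) : Int)
      = if a < matrix.length ∧ colv matrix k a = v then 1 else 0 := by
  rw [List.count_eq_countP, List.countP_map, List.countP_filter]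
  unfold pairsL
  rw [List.countP_map]
  rw [show ((fun p : Int × Int => ((fun x => x == (a : Int)) ∘ (fun p : Int × Int => p.2)) p
        && (fun p : Int × Int => p.1 == v) p) ∘ (fun t : Nat => (colv matrix k t, (t : Int))))
      = (fun t : Nat => (t == a) && (colv matrix k t == v)) from by
    funext t
    simp only [Function.comp]
    congr 1
    simp]
  rw [countP_range_aux (fun t => colv matrix k t == v) a matrix.length]
  by_cases hC : a < matrix.length ∧ colv matrix k a = v
  · rw [if_pos ⟨hC.1, by simp [hC.2]⟩, if_pos hC]; rfl
  · rw [if_neg (fun hc => hC ⟨hc.1, by simpa using hc.2⟩), if_neg hC]; rfl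

lemma sum_ind_zero (c d : Int) :
    ∀ ks : List Int, c ∉ ks →
      ((ks.map (fun v => if c = v ∧ d = v then (1 : Int) else 0)).sum) = 0 := by
  intro ks
  induction ks with
  | nil => simp
  | cons v ks ih =>
    intro h
    simp only [List.map_cons, List.sum_cons]
    rw [if_neg (fun hc => h (by simp [hc.1])), ih (fun hc => h (by simp [hc]))]
    ring

lemma sum_ind_one (c d : Int) :
    ∀ ks : List Int, ks.Nodup → c ∈ ks →
      ((ks.map (fun v => if c = v ∧ d = v then (1 : Int) else 0)).sum)
        = if c = d then 1 else 0 := by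
  intro ks
  induction ks with
  | nil => simp
  | cons v ks ih =>
    intro hnd hmem
    simp only [List.map_cons, List.sum_cons]
    rcases eq_or_ne c v with rfl | hcv
    · rw [sum_ind_zero c d ks ((List.nodup_cons.mp hnd).1)]
      by_cases hd : c = d
      · rw [if_pos ⟨rfl, hd.symm⟩, if_pos hd]; ring
      · rw [if_neg (fun hc : c = c ∧ d = c => hd hc.2.symm), if_neg hd]; ring
    · rw [if_neg (fun hc => hcv hc.1),
        ih (List.Nodup.of_cons hnd) (by rcases List.mem_cons.mp hmem with h|h; exact absurd h hcv; exact h)]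
      ring

-- the per-column sum over buckets is the equality indicator of column k
lemma sum_indicator (matrix : List (List Int)) (k : Nat) (a b : Nat)
    (ha : a < matrix.length) (hb : b < matrix.length) :
    (((bucketFold matrix k).values.map
        (fun g => (g.count (a : Int) : Int) * (g.count (b : Int) : Int))).sum)
      = if colv matrix k a = colv matrix k b then 1 else 0 := by
  rw [PySem.Dict.values_eq_map_keys _ (nodup_bucket_keys matrix k) [], List.map_map]
  rw [List.map_congr_left (l := (bucketFold matrix k).keys)
    (f := (fun g => ((g.count (a : Int) : Nat) : Int) * ((g.count (b : Int) : Nat) : Int)) ∘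
      (fun v => (bucketFold matrix k).getD v []))
    (g := fun v => if colv matrix k a = v ∧ colv matrix k b = v then (1 : Int) else 0)
    (by
      intro v _
      simp only [Function.comp]
      rw [bucket_getD, count_bucket, count_bucket]
      by_cases hx : colv matrix k a = v
      · by_cases hy : colv matrix k b = v
        · rw [if_pos ⟨ha, hx⟩, if_pos ⟨hb, hy⟩, if_pos ⟨hx, hy⟩]; ring
        · rw [if_pos ⟨ha, hx⟩, one_mul, if_neg (fun hc => hy hc.2), if_neg (fun hc => hy hc.2)]
      · rw [if_neg (fun hc => hx hc.2), zero_mul, if_neg (fun hc => hx hc.1)])]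
  have hmem : colv matrix k a ∈ (bucketFold matrix k).keys := by
    rw [bucketFold_eq, PySem.Dict.keys_foldl_modify_key]
    have : (PySem.Dict.empty : PySem.Dict Int (List Int)).keys = ([] : List Int) := by simp
    rw [this]
    rw [show ([] : List Int) = (PySem.Set.empty : PySem.Set Int) from rfl, PySem.Set.update_empty]
    rw [PySem.Set.mem_ofList]
    unfold pairsL
    rw [List.map_map]
    exact List.mem_map.mpr ⟨a, List.mem_range.mpr ha, rfl⟩
  exact sum_ind_one (colv matrix k a) (colv matrix k b) _ (nodup_bucket_keys matrix k) hmem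

-- folding colStep over a list of columns subtracts the number of agreeing columns
lemma fold_cols (matrix : List (List Int)) (ks : List Nat) :
    ∀ dm, ShapeN matrix.length dm →
      ShapeN matrix.length (ks.foldl (colStep matrix) dm) ∧
      ∀ a b, a < matrix.length → b < matrix.length →
        entryOf (ks.foldl (colStep matrix) dm) a b
          = entryOf dm a b -
            ((ks.map (fun c => if colv matrix c a = colv matrix c b then (1 : Int) else 0)).sum) := by
  induction ks with
  | nil => intro dm h; exact ⟨h, fun a b _ _ => by simp⟩
  | cons c ks ih =>
    intro dm h
    obtain ⟨hsh1, hent1⟩ :=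
      groups_dec_aux matrix.length (bucketFold matrix c).values (bucket_elems matrix c) dm h
    obtain ⟨hsh2, hent2⟩ := ih (colStep matrix dm c) hsh1
    refine ⟨by simpa [colStep] using hsh2, ?_⟩
    intro a b ha hb
    simp only [List.foldl_cons, List.map_cons, List.sum_cons]
    rw [hent2 a b ha hb]
    show entryOf _ a b - _ = _
    rw [show colStep matrix dm c = (bucketFold matrix c).values.foldl decPairs dm from rfl,
      hent1 a b ha hb, sum_indicator matrix c a b ha hb]
    ring

lemma getD_mem_of_lt {α : Type} (l : List α) (d : α) {a : Nat} (h : a < l.length) :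
    l.getD a d ∈ l := by
  rw [List.getD_eq_getElem?_getD, List.getElem?_eq_getElem h, Option.getD_some]
  exact List.getElem_mem h

-- B's result, pointwise, for a rectangular matrix
lemma calcB_eq (matrix : List (List Int))
    (hL : ∀ r ∈ matrix, r.length = (matrix.headD []).length) :
    calculate_dmatrix_alt matrix =
      (List.range matrix.length).map (fun i =>
        (List.range matrix.length).map (fun j => ent matrix i j)) := by
  have hkey : calculate_dmatrix_alt matrix =
      (List.range ((matrix.headD []).length - 1)).foldl (colStep matrix)
        (List.replicate matrix.length (List.replicate matrix.length
          (((matrix.headD []).length - 1 : Nat) : Int))) := rfl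
  have hinit : ShapeN matrix.length
      (List.replicate matrix.length (List.replicate matrix.length
        (((matrix.headD []).length - 1 : Nat) : Int))) := by
    refine ⟨by simp, ?_⟩
    intro a ha
    rw [List.getD_eq_getElem?_getD]
    simp [ha]
  obtain ⟨hsh, hent⟩ := fold_cols matrix (List.range ((matrix.headD []).length - 1)) _ hinit
  rw [← hkey] at hsh hent
  have hentry : ∀ a b, a < matrix.length → b < matrix.length →
      entryOf (calculate_dmatrix_alt matrix) a b = ent matrix a b := by
    intro a b ha hb
    rw [hent a b ha hb]
    have hinitent : entryOf
        (List.replicate matrix.length (List.replicate matrix.length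
          (((matrix.headD []).length - 1 : Nat) : Int))) a b
        = (((matrix.headD []).length - 1 : Nat) : Int) := by
      rw [entryOf, List.getD_eq_getElem?_getD]
      simp [ha, List.getD_eq_getElem?_getD, hb]
    rw [hinitent]
    have hra : (matrix.getD a []).length = (matrix.headD []).length :=
      hL _ (getD_mem_of_lt _ _ ha)
    unfold ent
    rw [hra,
      ← PySem.List.sum_map_ite_one_zero
        (fun c => decide ((matrix.getD a []).getD c 0 ≠ (matrix.getD b []).getD c 0))]
    have hsplit :
        ((List.range ((matrix.headD []).length - 1)).map
          (fun c => if colv matrix c a = colv matrix c b then (1 : Int) else 0)).sum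
        + ((List.range ((matrix.headD []).length - 1)).map
          (fun c => if decide ((matrix.getD a []).getD c 0 ≠ (matrix.getD b []).getD c 0) = true
            then (1 : Int) else 0)).sum
        = (((matrix.headD []).length - 1 : Nat) : Int) := by
      rw [← PySem.List.sum_map_add_int]
      rw [List.map_congr_left (g := fun _ => (1 : Int)) (by
        intro c _
        by_cases hc : colv matrix c a = colv matrix c b
        · rw [if_pos hc, if_neg (by simpa [colv] using hc)]; simp
        · rw [if_neg hc, if_pos (by simpa [colv] using hc)]; simp)]
      rw [PySem.List.sum_map_const_int]
      simp
    linarith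
  apply List.ext_getElem
  · simp [hsh.1]
  · intro a ha1 ha2
    have han : a < matrix.length := by simpa [hsh.1] using ha1
    have hrowa : ((calculate_dmatrix_alt matrix)[a]'ha1).length = matrix.length := by
      have := hsh.2 a han
      rwa [List.getD_eq_getElem?_getD, List.getElem?_eq_getElem ha1, Option.getD_some] at this
    apply List.ext_getElem
    · simp [hrowa]
    · intro b hb1 hb2
      have hbn : b < matrix.length := by omega
      have hrowa' : (calculate_dmatrix_alt matrix).getD a [] = (calculate_dmatrix_alt matrix)[a] := by
        rw [List.getD_eq_getElem?_getD, List.getElem?_eq_getElem ha1, Option.getD_some]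
      have hread : entryOf (calculate_dmatrix_alt matrix) a b =
          (calculate_dmatrix_alt matrix)[a][b] := by
        rw [entryOf, hrowa', List.getD_eq_getElem?_getD, List.getElem?_eq_getElem hb1,
          Option.getD_some]
      rw [← hread, hentry a b han hbn]
      simp

-- ===== VERDICT (by name: the statement is the Claim_ definition above) =====
theorem calculate_dmatrix_spec : Claim_equal_calculate_dmatrix := by
  intro matrix _ hpre
  unfold Spec_calculate_dmatrix
  rw [calcA_eq, calcB_eq matrix hpre.2]
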